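-- pv_equiv track=rewrite | github.com/JessyGirard/ai-agent | core/persistence.py | _normalize_memory_items_with_unique_ids
-- ===== SOURCE A (Python) =====
-- def _next_memory_id(existing_ids):
--     max_id = 0
--     for memory_id in existing_ids:
--         if not isinstance(memory_id, str):
--             continue
--         if not memory_id.startswith("mem_"):
--             continue
--         suffix = memory_id[4:]
--         if suffix.isdigit():
--             max_id = max(max_id, int(suffix))
--     return f"mem_{max_id + 1:04d}"
--
-- def _normalize_memory_items_with_unique_ids(memory_items):
--     if not isinstance(memory_items, list):
--         return []
--     normalized = []
--     seen = set()
--     for item in memory_items: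
--         if not isinstance(item, dict):
--             continue
--         row = item.copy()
--         memory_id = row.get("memory_id")
--         if not isinstance(memory_id, str) or not memory_id.strip() or memory_id in seen:
--             memory_id = _next_memory_id(seen)
--             row["memory_id"] = memory_id
--         seen.add(memory_id)
--         normalized.append(row)
--     return normalized
-- ===== SOURCE B (Python) =====
-- def _normalize_memory_items_with_unique_ids(memory_items):
--     if not isinstance(memory_items, list):
--         return []
--     out = []
--     seen = set()
--     high = 0  # running maximum of the numeric mem_ suffixes present in `seen`
--     for item in memory_items:
--         if not isinstance(item, dict):
--             continue
--         given = item.get("memory_id")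
--         keep = isinstance(given, str) and bool(given.strip()) and given not in seen
--         if keep:
--             mid, row = given, dict(item)
--         else:
--             mid = "mem_%04d" % (high + 1)
--             row = {**item, "memory_id": mid}
--         seen.add(mid)
--         if mid.startswith("mem_") and mid[4:].isdigit():
--             high = max(high, int(mid[4:]))
--         out.append(row)
--     return out
-- ===== Notes on version B (the rewrite author's own statement) =====
-- stated objective: faster
-- what changed: B keeps a running maximum `high` of the numeric mem_ suffixes, updated once per accepted id, so fresh ids are minted in O(1) instead of A's per-item rescan of the whole seen set (_next_memory_id).
import Mathlib
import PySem

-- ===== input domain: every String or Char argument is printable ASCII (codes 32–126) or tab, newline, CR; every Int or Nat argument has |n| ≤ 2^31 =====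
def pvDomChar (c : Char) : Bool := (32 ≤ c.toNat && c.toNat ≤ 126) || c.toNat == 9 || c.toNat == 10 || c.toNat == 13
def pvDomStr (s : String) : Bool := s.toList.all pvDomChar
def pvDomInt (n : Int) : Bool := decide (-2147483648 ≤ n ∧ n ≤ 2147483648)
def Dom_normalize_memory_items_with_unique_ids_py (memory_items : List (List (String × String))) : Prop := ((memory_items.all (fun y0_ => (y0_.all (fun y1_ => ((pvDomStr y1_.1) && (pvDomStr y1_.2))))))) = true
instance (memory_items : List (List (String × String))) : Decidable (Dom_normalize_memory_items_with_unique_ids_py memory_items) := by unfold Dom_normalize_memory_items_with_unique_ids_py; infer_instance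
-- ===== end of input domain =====

-- B replaces A's per-item rescan of `seen` (_next_memory_id) by a running maximum `high` of the
-- numeric mem_ suffixes, updated once per accepted id — O(n) instead of O(n^2).


-- ===== PORT A =====
-- _next_memory_id(existing_ids): fold over the set computing the max numeric "mem_" suffix.
-- (isinstance(memory_id, str) is always true under the type convention; `int(suffix)` is ported
-- as ofStr? with getD 0, the getD branch unreachable under the isdigit guard; f"mem_{n:04d}" is
-- "mem_" ++ zfill(str n, 4), exact since n = max_id + 1 ≥ 1.)
def pv_next_memory_id (existing_ids : PySem.Set String) : String :=
  let max_id := existing_ids.foldl (fun max_id memory_id =>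
    if ¬ PySem.Str.startswith memory_id "mem_" then max_id
    else
      let suffix := PySem.Str.slice memory_id (some 4)
      if PySem.Str.strIsdigit suffix then
        max max_id ((PySem.Int.ofStr? suffix).getD 0)
      else max_id) 0
  "mem_" ++ PySem.Str.zfill (PySem.Int.toStr (max_id + 1)) 4

-- _normalize_memory_items_with_unique_ids: every item is a dict (the type guarantees the
-- isinstance checks); loop state = (normalized, seen).
def normalize_memory_items_with_unique_ids_py (memory_items : List (List (String × String))) : List (List (String × String)) :=
  (memory_items.foldl
    (fun (st : List (List (String × String)) × PySem.Set String) item =>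
      let row : PySem.Dict String String := PySem.Dict.mk item
      let mid? := row.get? "memory_id"
      let (row, memory_id) :=
        match mid? with
        | some mid =>
            if PySem.Str.strip mid == "" || st.2.contains mid then
              let nid := pv_next_memory_id st.2
              (row.insert "memory_id" nid, nid)
            else (row, mid)
        | none =>
            let nid := pv_next_memory_id st.2
            (row.insert "memory_id" nid, nid)
      (st.1 ++ [row.items], st.2.add memory_id))
    ([], PySem.Set.empty)).1

-- ===== PORT B =====
-- the `if mid.startswith("mem_") and mid[4:].isdigit(): high = max(high, int(mid[4:]))` update
def pvHighStep (high : Int) (mid : String) : Int :=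
  if PySem.Str.startswith mid "mem_" && PySem.Str.strIsdigit (PySem.Str.slice mid (some 4)) then
    max high ((PySem.Int.ofStr? (PySem.Str.slice mid (some 4))).getD 0)
  else high

-- Source B's loop, as structural recursion emitting each row by cons; args = (remaining items, seen,
-- high).  `keep` is Python's `isinstance(given, str) and bool(given.strip()) and given not in seen`
-- (the isinstance part is the `some` case of get?); when keep is true `given?` is some, so
-- `given?.getD ""` is exactly the Python variable `given`.  `"mem_%04d" % n` = "mem_" ++ zfill(str n,4).
def pvNormRec : List (List (String × String)) → PySem.Set String → Int → List (List (String × String))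
  | [], _, _ => []
  | item :: rest, seen, high =>
      let row : PySem.Dict String String := PySem.Dict.mk item
      let given? := row.get? "memory_id"
      let keep : Bool :=
        match given? with
        | some given => !(PySem.Str.strip given == "") && !(seen.contains given)
        | none => false
      if keep then
        let mid := given?.getD ""
        row.items :: pvNormRec rest (seen.add mid) (pvHighStep high mid)
      else
        let mid := "mem_" ++ PySem.Str.zfill (PySem.Int.toStr (high + 1)) 4
        (row.insert "memory_id" mid).items :: pvNormRec rest (seen.add mid) (pvHighStep high mid)

def normalize_memory_items_with_unique_ids_py_alt (memory_items : List (List (String × String))) : List (List (String × String)) :=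
  pvNormRec memory_items PySem.Set.empty 0

-- ===== PRECONDITION & SPEC =====
def Spec_normalize_memory_items_with_unique_ids_py (memory_items : List (List (String × String))) (out : List (List (String × String))) : Prop := out = normalize_memory_items_with_unique_ids_py_alt memory_items
instance (memory_items : List (List (String × String))) (out : List (List (String × String))) : Decidable (Spec_normalize_memory_items_with_unique_ids_py memory_items out) := by unfold Spec_normalize_memory_items_with_unique_ids_py; infer_instance

-- ===== CLAIM (what is proved, stated in full; the proofs are below) =====
def Claim_equal_normalize_memory_items_with_unique_ids_py : Prop := ∀ (memory_items : List (List (String × String))), Dom_normalize_memory_items_with_unique_ids_py memory_items → Spec_normalize_memory_items_with_unique_ids_py memory_items (normalize_memory_items_with_unique_ids_py memory_items)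

-- ===== LEMMAS AND PROOFS =====

-- A's fold step over the seen set (the lambda inside pv_next_memory_id, named for the proofs)
def pvStepA (max_id : Int) (memory_id : String) : Int :=
  if ¬ PySem.Str.startswith memory_id "mem_" then max_id
  else if PySem.Str.strIsdigit (PySem.Str.slice memory_id (some 4)) then
    max max_id ((PySem.Int.ofStr? (PySem.Str.slice memory_id (some 4))).getD 0)
  else max_id

-- A's per-call maximum as a function of the seen set
def pvMaxOf (seen : PySem.Set String) : Int := seen.foldl pvStepA 0

lemma pv_next_memory_id_eq (seen : PySem.Set String) :
    pv_next_memory_id seen = "mem_" ++ PySem.Str.zfill (PySem.Int.toStr (pvMaxOf seen + 1)) 4 := rfl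

-- B's high-update is A's fold step
lemma pvHighStep_eq (m : Int) (id : String) : pvHighStep m id = pvStepA m id := by
  unfold pvHighStep pvStepA
  by_cases h : PySem.Str.startswith id "mem_" = true
  · by_cases h2 : PySem.Str.strIsdigit (PySem.Str.slice id (some 4)) = true
    · rw [if_pos (by rw [h, h2]; rfl), if_neg (not_not_intro h), if_pos h2]
    · rw [if_neg (by rw [h, eq_false_of_ne_true h2, Bool.true_and]; exact Bool.false_ne_true),
        if_neg (not_not_intro h), if_neg h2]
  · rw [if_neg (by rw [eq_false_of_ne_true h, Bool.false_and]; exact Bool.false_ne_true), if_pos h]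

lemma le_pvStepA (a : Int) (x : String) : a ≤ pvStepA a x := by
  unfold pvStepA
  by_cases h : PySem.Str.startswith x "mem_" = true
  · rw [if_neg (not_not_intro h)]
    by_cases h2 : PySem.Str.strIsdigit (PySem.Str.slice x (some 4)) = true
    · rw [if_pos h2]; exact le_max_left _ _
    · rw [if_neg h2]
  · rw [if_pos h]

lemma pvStepA_mono {a b : Int} (x : String) (h : a ≤ b) : pvStepA a x ≤ pvStepA b x := by
  unfold pvStepA
  by_cases hs : PySem.Str.startswith x "mem_" = true
  · rw [if_neg (not_not_intro hs), if_neg (not_not_intro hs)]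
    by_cases h2 : PySem.Str.strIsdigit (PySem.Str.slice x (some 4)) = true
    · rw [if_pos h2, if_pos h2]; exact max_le_max h le_rfl
    · rw [if_neg h2, if_neg h2]; exact h
  · rw [if_pos hs, if_pos hs]; exact h

lemma pv_le_foldl_stepA (l : List String) (a : Int) : a ≤ l.foldl pvStepA a := by
  induction l generalizing a with
  | nil => exact le_rfl
  | cons x xs ih => exact le_trans (le_pvStepA a x) (ih (pvStepA a x))

-- an element of the list is dominated by the fold's value
lemma pv_mem_le_foldl (l : List String) (a : Int) (id : String) (hmem : id ∈ l) :
    pvStepA a id ≤ l.foldl pvStepA a := by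
  induction l generalizing a with
  | nil => cases hmem
  | cons x xs ih =>
      simp only [List.foldl_cons]
      rcases List.mem_cons.mp hmem with rfl | hx
      · exact pv_le_foldl_stepA xs (pvStepA a id)
      · exact le_trans (pvStepA_mono id (le_pvStepA a x)) (ih _ hx)

-- adding an id to the seen set changes A's maximum exactly by one fold step
lemma pvMaxOf_add (seen : PySem.Set String) (id : String) :
    pvMaxOf (PySem.Set.add seen id) = pvStepA (pvMaxOf seen) id := by
  unfold pvMaxOf PySem.Set.add
  by_cases hmem : PySem.Set.contains seen id = true
  · rw [if_pos hmem]
    have hm : id ∈ seen := List.mem_of_elem_eq_true hmem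
    have h1 : pvStepA 0 id ≤ List.foldl pvStepA 0 seen := pv_mem_le_foldl seen 0 id hm
    symm
    unfold pvStepA at h1 ⊢
    by_cases hs : PySem.Str.startswith id "mem_" = true
    · rw [if_neg (not_not_intro hs)]
      rw [if_neg (not_not_intro hs)] at h1
      by_cases hd : PySem.Str.strIsdigit (PySem.Str.slice id (some 4)) = true
      · rw [if_pos hd]
        rw [if_pos hd] at h1
        exact max_eq_left (le_trans (le_max_right 0 _) h1)
      · rw [if_neg hd]
    · rw [if_pos hs]
  · rw [if_neg hmem, List.foldl_append]
    rfl

-- A's loop body, named (definitionally the lambda of the A port)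
def pvBodyA (st : List (List (String × String)) × PySem.Set String)
    (item : List (String × String)) : List (List (String × String)) × PySem.Set String :=
  let row : PySem.Dict String String := PySem.Dict.mk item
  let mid? := row.get? "memory_id"
  let (row, memory_id) :=
    match mid? with
    | some mid =>
        if PySem.Str.strip mid == "" || PySem.Set.contains st.2 mid then
          let nid := pv_next_memory_id st.2
          (row.insert "memory_id" nid, nid)
        else (row, mid)
    | none =>
        let nid := pv_next_memory_id st.2
        (row.insert "memory_id" nid, nid)
  (st.1 ++ [row.items], PySem.Set.add st.2 memory_id)

lemma pvA_eq (memory_items : List (List (String × String))) :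
    normalize_memory_items_with_unique_ids_py memory_items =
    (memory_items.foldl pvBodyA ([], PySem.Set.empty)).1 := rfl

-- main invariant: A's accumulator fold equals the accumulator ++ B's recursion, when B's
-- `high` argument carries exactly A's rescanned maximum of `seen`
lemma pv_loop_eq (items : List (List (String × String)))
    (n : List (List (String × String))) (seen : PySem.Set String) :
    (items.foldl pvBodyA (n, seen)).1 = n ++ pvNormRec items seen (pvMaxOf seen) := by
  induction items generalizing n seen with
  | nil => simp [pvNormRec]
  | cons item rest ih =>
      simp only [List.foldl_cons]
      rcases h : (PySem.Dict.mk item : PySem.Dict String String).get? "memory_id" with _ | mid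
      · -- no "memory_id" key: both mint the fresh id
        have hA : pvBodyA (n, seen) item =
            (n ++ [((PySem.Dict.mk item : PySem.Dict String String).insert "memory_id"
                (pv_next_memory_id seen)).items],
             PySem.Set.add seen (pv_next_memory_id seen)) := by
          simp only [pvBodyA, h]
        rw [hA, ih]
        simp only [pvNormRec, h, Bool.false_eq_true, if_false, pv_next_memory_id_eq, pvHighStep_eq,
          pvMaxOf_add, List.append_assoc, List.singleton_append]
      · by_cases hc : (PySem.Str.strip mid == "" || PySem.Set.contains seen mid) = true
        · -- empty-after-strip or duplicate: both mint the fresh id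
          have hA : pvBodyA (n, seen) item =
              (n ++ [((PySem.Dict.mk item : PySem.Dict String String).insert "memory_id"
                  (pv_next_memory_id seen)).items],
               PySem.Set.add seen (pv_next_memory_id seen)) := by
            simp only [pvBodyA, h]; rw [if_pos hc]
          rw [hA, ih]
          have hk : (!(PySem.Str.strip mid == "") && !(PySem.Set.contains seen mid)) = false := by
            simp only [← Bool.not_or, hc, Bool.not_true]
          simp only [pvNormRec, h, hk, Bool.false_eq_true, if_false, pv_next_memory_id_eq, pvHighStep_eq,
            pvMaxOf_add, List.append_assoc, List.singleton_append]
        · -- the given id is kept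
          have hA : pvBodyA (n, seen) item =
              (n ++ [(PySem.Dict.mk item : PySem.Dict String String).items],
               PySem.Set.add seen mid) := by
            simp only [pvBodyA, h]; rw [if_neg hc]
          rw [hA, ih]
          have hk : (!(PySem.Str.strip mid == "") && !(PySem.Set.contains seen mid)) = true := by
            rw [← Bool.not_or, eq_false_of_ne_true hc, Bool.not_false]
          simp only [pvNormRec, h, hk, if_true, Option.getD_some, pvHighStep_eq, pvMaxOf_add,
            List.append_assoc, List.singleton_append]

-- ===== VERDICT (by name: the statement is the Claim_ definition above) =====
theorem normalize_memory_items_with_unique_ids_py_spec : Claim_equal_normalize_memory_items_with_unique_ids_py := by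
  intro memory_items _
  unfold Spec_normalize_memory_items_with_unique_ids_py
  rw [pvA_eq]
  have h := pv_loop_eq memory_items [] PySem.Set.empty
  simpa [normalize_memory_items_with_unique_ids_py_alt] using h
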